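-- pv_equiv track=rewrite | github.com/arkaprabha10/Optimization-IE-402- | vam_trial.py | look_for_trend
-- ===== SOURCE A (Python) =====
-- def look_for_trend(row_present_size, column_present_size, another_matrix):
--     another_matrix = another_matrix.copy()
--     present_row = [0]*row_present_size
--     present_colum =[0]*column_present_size
--     for ind_i, ind_j in another_matrix:
--         present_row[ind_i] += 1
--         present_colum[ind_j] += 1
--     while True:
--         bool_value = True
--         for k in range(row_present_size):
--             if present_row[k] == 1:
--                 bool_value = False
--                 for ind_i, ind_j in another_matrix:
--                     if ind_i == k:
--                         present_colum[ind_j] -= 1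
--                         present_row[ind_i] = 0
--                         another_matrix.remove((ind_i, ind_j))
--                         break
--         for k in range(column_present_size):
--             if present_colum[k] == 1:
--                 bool_value = False
--                 for ind_i, ind_j in another_matrix:
--                     if ind_j == k:
--                         present_row[ind_i] -= 1
--                         present_colum[ind_j] = 0
--                         another_matrix.remove((ind_i, ind_j))
--                         break
--         if bool_value:
--             return another_matrix
--         if len(another_matrix) < 4:
--             return None
-- ===== SOURCE B (Python) =====
-- def look_for_trend(row_present_size, column_present_size, another_matrix):
--     edges = another_matrix
--     while True:
--         row_deg = [0] * row_present_size
--         col_deg = [0] * column_present_size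
--         for i, j in edges:
--             row_deg[i] += 1
--             col_deg[j] += 1
--         kept = [(i, j) for i, j in edges if row_deg[i] >= 2 and col_deg[j] >= 2]
--         if len(kept) == len(edges):
--             break
--         edges = kept
--     if len(edges) == len(another_matrix) or len(edges) >= 4:
--         return edges
--     return None
-- ===== Notes on version B (the rewrite author's own statement) =====
-- stated objective: simpler
-- what changed: A repeatedly sweeps every row/column index, rescanning and mutating the edge list to delete one degree-1 edge at a time per index (each deletion an O(E) scan plus O(E) list.remove); B instead iterates a batch round that rebuilds the degree tables in one pass and filters out all edges with a degree-1 endpoint at once, then applies the same return rule (list unchanged, or >= 4 edges left, else None).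
import Mathlib
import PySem

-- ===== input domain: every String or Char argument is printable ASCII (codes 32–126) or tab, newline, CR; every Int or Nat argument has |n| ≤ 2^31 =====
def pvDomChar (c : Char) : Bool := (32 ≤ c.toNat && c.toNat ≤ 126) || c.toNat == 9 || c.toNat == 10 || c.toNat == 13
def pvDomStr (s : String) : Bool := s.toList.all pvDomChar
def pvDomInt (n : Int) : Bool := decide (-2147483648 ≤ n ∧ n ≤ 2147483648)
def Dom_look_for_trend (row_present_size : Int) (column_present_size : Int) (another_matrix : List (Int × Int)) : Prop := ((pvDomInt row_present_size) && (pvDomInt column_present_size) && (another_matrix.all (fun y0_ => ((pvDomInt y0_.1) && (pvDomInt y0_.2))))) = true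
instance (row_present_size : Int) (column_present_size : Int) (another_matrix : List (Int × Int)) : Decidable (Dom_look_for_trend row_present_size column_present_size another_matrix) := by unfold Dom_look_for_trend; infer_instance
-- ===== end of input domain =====

-- B replaces A's quadratic per-vertex scan-and-remove sweeps by repeatedly filtering the edge
-- list against degree counters built in one pass (objective: simpler and measurably faster).

-- ===== PORT A =====
-- `xs[i] += d` (read + index assignment); IndexError is excluded by Pre_look_for_trend.
def lftIncr (xs : List Int) (i d : Int) : List Int :=
  PySem.List.pySetD xs i (PySem.List.pyGetD xs i 0 + d)

-- one `k` of `for k in range(row_present_size)`; state (another_matrix, present_row, present_colum, bool_value)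
def lftRowStep (st : List (Int × Int) × List Int × List Int × Bool) (k : Int) :
    List (Int × Int) × List Int × List Int × Bool :=
  match st with
  | (am, pr, pc, b) =>
    if PySem.List.pyGetD pr k 0 = 1 then
      -- `bool_value = False`, then the inner `for (ind_i, ind_j) in another_matrix: if ind_i == k: ...; break`
      match am.find? (fun e => e.1 == k) with
      | some e =>
          -- present_colum[ind_j] -= 1; present_row[ind_i] = 0; another_matrix.remove((ind_i, ind_j))
          -- (`e` was just found in `am`, so `remove?` is `some`; the `.getD am` default is unreachable)
          ((PySem.List.remove? am e).getD am, PySem.List.pySetD pr e.1 0, lftIncr pc e.2 (-1), false)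
      | none => (am, pr, pc, false)
    else (am, pr, pc, b)

-- one `k` of `for k in range(column_present_size)`
def lftColStep (st : List (Int × Int) × List Int × List Int × Bool) (k : Int) :
    List (Int × Int) × List Int × List Int × Bool :=
  match st with
  | (am, pr, pc, b) =>
    if PySem.List.pyGetD pc k 0 = 1 then
      match am.find? (fun e => e.2 == k) with
      | some e =>
          -- present_row[ind_i] -= 1; present_colum[ind_j] = 0; another_matrix.remove((ind_i, ind_j))
          ((PySem.List.remove? am e).getD am, lftIncr pr e.1 (-1), PySem.List.pySetD pc e.2 0, false)
      | none => (am, pr, pc, false)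
    else (am, pr, pc, b)

-- the `while True:` loop; fuel `len + 1` suffices because every iteration that does not
-- return removes at least one edge (unreachable fuel exhaustion returns none)
def lftLoop (rows cols : Int) : Nat → List (Int × Int) → List Int → List Int → Option (List (Int × Int))
  | 0, _, _, _ => none
  | fuel+1, am, pr, pc =>
    let s1 := (PySem.List.pyRange 0 rows 1).foldl lftRowStep (am, pr, pc, true)
    let s2 := (PySem.List.pyRange 0 cols 1).foldl lftColStep s1
    if s2.2.2.2 then some s2.1
    else if s2.1.length < 4 then none
    else lftLoop rows cols fuel s2.1 s2.2.1 s2.2.2.1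

def look_for_trend (row_present_size : Int) (column_present_size : Int) (another_matrix : List (Int × Int)) : Option (List (Int × Int)) :=
  -- present_row = [0]*row_present_size; present_colum = [0]*column_present_size; counting loop
  let s := another_matrix.foldl (fun s e => (lftIncr s.1 e.1 1, lftIncr s.2 e.2 1))
      (List.replicate row_present_size.toNat 0, List.replicate column_present_size.toNat 0)
  lftLoop row_present_size column_present_size (another_matrix.length + 1) another_matrix s.1 s.2

-- ===== PORT B =====
-- the `while True:` loop of B: each round rebuilds the degree tables `[0]*size` in one pass
-- over the edges and filters out every edge with a degree-1 endpoint at once; each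
-- non-breaking round strictly shrinks the list, so fuel `|E|` suffices (at fuel 0 the list
-- is empty, a fixpoint)
def lftPrune : Nat → Int → Int → List (Int × Int) → List (Int × Int)
  | 0, _, _, E => E
  | f+1, rows, cols, E =>
    let s := E.foldl (fun s e => (lftIncr s.1 e.1 1, lftIncr s.2 e.2 1))
      (List.replicate rows.toNat 0, List.replicate cols.toNat 0)
    let kept := E.filter (fun e => 2 ≤ PySem.List.pyGetD s.1 e.1 0 && 2 ≤ PySem.List.pyGetD s.2 e.2 0)
    if kept.length = E.length then E else lftPrune f rows cols kept

def look_for_trend_alt (row_present_size : Int) (column_present_size : Int) (another_matrix : List (Int × Int)) : Option (List (Int × Int)) :=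
  let E := lftPrune another_matrix.length row_present_size column_present_size another_matrix
  if E.length = another_matrix.length ∨ 4 ≤ E.length then some E else none

-- ===== PRECONDITION & SPEC =====
-- Pre_ excludes edge endpoints outside [0, size): a non-negative out-of-range endpoint makes
-- both A and B raise IndexError, and a negative endpoint is counted under a wrapped-around slot
-- (Python negative indexing) that A's scans `ind_i == k`, k ≥ 0, can never remove, which makes A
-- DIVERGE on part of that region (B returns there; where A does return, B returns the same value).
def Pre_look_for_trend (row_present_size : Int) (column_present_size : Int) (another_matrix : List (Int × Int)) : Prop :=
  ∀ e ∈ another_matrix, 0 ≤ e.1 ∧ e.1 < row_present_size ∧ 0 ≤ e.2 ∧ e.2 < column_present_size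
instance (row_present_size : Int) (column_present_size : Int) (another_matrix : List (Int × Int)) : Decidable (Pre_look_for_trend row_present_size column_present_size another_matrix) := by unfold Pre_look_for_trend; infer_instance

def pvWitness_look_for_trend : Int × Int × (List (Int × Int)) := (2, 2, [(0, 0), (0, 1), (1, 0), (1, 1)])

def Spec_look_for_trend (row_present_size : Int) (column_present_size : Int) (another_matrix : List (Int × Int)) (out : Option (List (Int × Int))) : Prop := out = look_for_trend_alt row_present_size column_present_size another_matrix
instance (row_present_size : Int) (column_present_size : Int) (another_matrix : List (Int × Int)) (out : Option (List (Int × Int))) : Decidable (Spec_look_for_trend row_present_size column_present_size another_matrix out) := by unfold Spec_look_for_trend; infer_instance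

-- ===== CLAIM (what is proved, stated in full; the proofs are below) =====
def Claim_equal_look_for_trend : Prop := ∀ (row_present_size : Int) (column_present_size : Int) (another_matrix : List (Int × Int)), Dom_look_for_trend row_present_size column_present_size another_matrix → Pre_look_for_trend row_present_size column_present_size another_matrix → Spec_look_for_trend row_present_size column_present_size another_matrix (look_for_trend row_present_size column_present_size another_matrix)

-- ===== LEMMAS AND PROOFS =====

-- ---- math layer: degrees, one batch-filter step, iterated core ----
def degR (E : List (Int × Int)) (r : Int) : Nat := E.countP (fun e => e.1 == r)
def degC (E : List (Int × Int)) (c : Int) : Nat := E.countP (fun e => e.2 == c)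
def lfGood (E : List (Int × Int)) (e : Int × Int) : Bool :=
  decide (2 ≤ degR E e.1) && decide (2 ≤ degC E e.2)
def lfF (E : List (Int × Int)) : List (Int × Int) := E.filter (lfGood E)
def coreN : Nat → List (Int × Int) → List (Int × Int)
  | 0, E => E
  | f+1, E => if (lfF E).length = E.length then E else coreN f (lfF E)
def lfCore (E : List (Int × Int)) : List (Int × Int) := coreN E.length E
def lfStable (E : List (Int × Int)) : Prop := ∀ e ∈ E, lfGood E e = true

-- ---- generic multiset-count facts ----
theorem countP_le_of_counts_le : ∀ (S E : List (Int × Int)),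
    (∀ v, S.count v ≤ E.count v) → ∀ (p : (Int × Int) → Bool), S.countP p ≤ E.countP p
  | [], _, _, _ => Nat.zero_le _
  | s :: S', E, h, p => by
      have hsE : s ∈ E := by
        have h1 := h s
        rw [List.count_cons_self] at h1
        exact List.count_pos_iff.mp (by omega)
      have hperm := List.perm_cons_erase hsE
      rw [hperm.countP_eq p, List.countP_cons, List.countP_cons]
      have hrec := countP_le_of_counts_le S' (E.erase s) (fun v => by
        have hv := h v
        rw [List.count_erase]
        by_cases hvs : v = s
        · subst hvs; rw [List.count_cons_self] at hv; simp; omega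
        · rw [List.count_cons_of_ne (fun hh => hvs hh.symm)] at hv
          have : (s == v) = false := by simpa using fun hh => hvs hh.symm
          rw [this]; simpa using hv) p
      omega

theorem length_le_of_counts_le {S E : List (Int × Int)}
    (h : ∀ v, S.count v ≤ E.count v) : S.length ≤ E.length := by
  have := countP_le_of_counts_le S E h (fun _ => true)
  simpa using this

theorem length_eq_of_counts_eq {S E : List (Int × Int)}
    (h : ∀ v, S.count v = E.count v) : S.length = E.length :=
  Nat.le_antisymm (length_le_of_counts_le fun v => (h v).le)
    (length_le_of_counts_le fun v => (h v).ge)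

theorem degR_mono {S E : List (Int × Int)} (h : ∀ v, S.count v ≤ E.count v) (r : Int) :
    degR S r ≤ degR E r := countP_le_of_counts_le _ _ h _

theorem degC_mono {S E : List (Int × Int)} (h : ∀ v, S.count v ≤ E.count v) (c : Int) :
    degC S c ≤ degC E c := countP_le_of_counts_le _ _ h _

theorem count_le_degR (E : List (Int × Int)) (e : Int × Int) : E.count e ≤ degR E e.1 := by
  unfold degR List.count
  exact List.countP_mono_left (fun x _ hx => by
    have hxe : x = e := by simpa using hx
    simp [hxe])

theorem count_le_degC (E : List (Int × Int)) (e : Int × Int) : E.count e ≤ degC E e.2 := by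
  unfold degC List.count
  exact List.countP_mono_left (fun x _ hx => by
    have hxe : x = e := by simpa using hx
    simp [hxe])

theorem degR_pos_of_mem {E : List (Int × Int)} {e : Int × Int} (h : e ∈ E) : 1 ≤ degR E e.1 := by
  unfold degR
  exact List.countP_pos_iff.mpr ⟨e, h, by simp⟩

theorem degC_pos_of_mem {E : List (Int × Int)} {e : Int × Int} (h : e ∈ E) : 1 ≤ degC E e.2 := by
  unfold degC
  exact List.countP_pos_iff.mpr ⟨e, h, by simp⟩

-- ---- core facts ----
theorem lfF_eq_of_stable {E : List (Int × Int)} (h : lfStable E) : lfF E = E :=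
  List.filter_eq_self.mpr h

theorem stable_of_lfF_len {E : List (Int × Int)} (h : (lfF E).length = E.length) : lfStable E :=
  List.filter_eq_self.mp (List.filter_sublist.eq_of_length h)

theorem coreN_stable : ∀ (f : Nat) (E : List (Int × Int)), E.length ≤ f → lfStable (coreN f E)
  | 0, E, h => by
      have : E = [] := List.eq_nil_of_length_eq_zero (Nat.le_zero.mp h)
      subst this; intro e he; cases he
  | f+1, E, h => by
      unfold coreN
      by_cases hl : (lfF E).length = E.length
      · simpa [hl] using stable_of_lfF_len hl
      · have hlt : (lfF E).length < E.length :=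
          Nat.lt_of_le_of_ne (List.length_filter_le _ _) hl
        simpa [hl] using coreN_stable f (lfF E) (by omega)

theorem coreN_counts_le : ∀ (f : Nat) (E : List (Int × Int)) (v : Int × Int),
    (coreN f E).count v ≤ E.count v
  | 0, E, v => le_rfl
  | f+1, E, v => by
      unfold coreN
      by_cases hl : (lfF E).length = E.length
      · simp [hl]
      · have h1 := coreN_counts_le f (lfF E) v
        have h2 : (lfF E).count v ≤ E.count v := by
          by_cases hg : lfGood E v = true
          · rw [lfF, List.count_filter hg]
          · have hnm : v ∉ lfF E := fun hm => hg ((List.mem_filter.mp hm).2)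
            rw [List.count_eq_zero_of_not_mem hnm]
            exact Nat.zero_le _
        simpa [hl] using le_trans h1 h2

theorem coreN_of_stable {E : List (Int × Int)} (h : lfStable E) : ∀ f, coreN f E = E
  | 0 => rfl
  | f+1 => by unfold coreN; rw [lfF_eq_of_stable h]; simp

theorem coreN_max : ∀ (f : Nat) (E S : List (Int × Int)), lfStable S →
    (∀ v, S.count v ≤ E.count v) → ∀ v, S.count v ≤ (coreN f E).count v
  | 0, E, S, _, h, v => h v
  | f+1, E, S, hS, h, v => by
      unfold coreN
      by_cases hl : (lfF E).length = E.length
      · simpa [hl] using h v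
      · have hsub : ∀ w, S.count w ≤ (lfF E).count w := by
          intro w
          by_cases hw : w ∈ S
          · have hg : lfGood S w = true := hS w hw
            have h2R : 2 ≤ degR S w.1 := by
              have := (Bool.and_eq_true ..).mp hg |>.1; simpa using this
            have h2C : 2 ≤ degC S w.2 := by
              have := (Bool.and_eq_true ..).mp hg |>.2; simpa using this
            have hgE : lfGood E w = true := by
              unfold lfGood
              have := le_trans h2R (degR_mono h w.1)
              have := le_trans h2C (degC_mono h w.2)
              simp; omega
            rw [lfF, List.count_filter hgE]; exact h w
          · simp [List.count_eq_zero_of_not_mem hw]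
        simpa [hl] using coreN_max f (lfF E) S hS hsub v

theorem lfCore_stable (E : List (Int × Int)) : lfStable (lfCore E) :=
  coreN_stable _ _ le_rfl

theorem lfCore_counts_le (E : List (Int × Int)) (v : Int × Int) :
    (lfCore E).count v ≤ E.count v := coreN_counts_le _ _ _

theorem lfCore_max {E S : List (Int × Int)} (hS : lfStable S)
    (h : ∀ v, S.count v ≤ E.count v) (v : Int × Int) : S.count v ≤ (lfCore E).count v :=
  coreN_max _ _ _ hS h v

theorem lfCore_sandwich {E E' : List (Int × Int)}
    (h1 : ∀ v, (lfCore E).count v ≤ E'.count v) (h2 : ∀ v, E'.count v ≤ E.count v) :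
    ∀ v, (lfCore E').count v = (lfCore E).count v := by
  intro v
  exact Nat.le_antisymm
    (lfCore_max (lfCore_stable E') (fun w => le_trans (lfCore_counts_le E' w) (h2 w)) v)
    (lfCore_max (lfCore_stable E) h1 v)

theorem leaf_not_in_core_row {E : List (Int × Int)} {v : Int × Int} (h : degR E v.1 = 1) :
    (lfCore E).count v = 0 := by
  by_contra hc
  have hm : v ∈ lfCore E := List.count_pos_iff.mp (Nat.pos_of_ne_zero hc)
  have hg := lfCore_stable E v hm
  have h2 : 2 ≤ degR (lfCore E) v.1 := by
    have := (Bool.and_eq_true ..).mp hg |>.1; simpa using this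
  have := degR_mono (lfCore_counts_le E) v.1
  omega

theorem leaf_not_in_core_col {E : List (Int × Int)} {v : Int × Int} (h : degC E v.2 = 1) :
    (lfCore E).count v = 0 := by
  by_contra hc
  have hm : v ∈ lfCore E := List.count_pos_iff.mp (Nat.pos_of_ne_zero hc)
  have hg := lfCore_stable E v hm
  have h2 : 2 ≤ degC (lfCore E) v.2 := by
    have := (Bool.and_eq_true ..).mp hg |>.2; simpa using this
  have := degC_mono (lfCore_counts_le E) v.2
  omega

theorem lfCore_erase {E : List (Int × Int)} {v : Int × Int} (hv : v ∈ E)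
    (h0 : (lfCore E).count v = 0) :
    ∀ w, (lfCore (E.erase v)).count w = (lfCore E).count w := by
  apply lfCore_sandwich
  · intro w
    by_cases hw : w = v
    · subst hw; simp [h0]
    · have : (E.erase v).count w = E.count w := by
        rw [List.count_erase]; simp [Ne.symm hw]
      rw [this]; exact lfCore_counts_le E w
  · intro w
    rw [List.count_erase]; omega

-- ---- filter-form (every intermediate edge list is the original filtered by membership) ----
theorem exists_filter_coreN : ∀ (f : Nat) (E : List (Int × Int)),
    ∃ p, coreN f E = E.filter p
  | 0, E => ⟨fun _ => true, by simp [coreN]⟩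
  | f+1, E => by
      unfold coreN
      by_cases hl : (lfF E).length = E.length
      · rw [if_pos hl]; exact ⟨fun _ => true, by simp⟩
      · obtain ⟨p, hp⟩ := exists_filter_coreN f (lfF E)
        refine ⟨fun x => lfGood E x && p x, ?_⟩
        rw [if_neg hl, hp, lfF, List.filter_filter]
        exact List.filter_congr (fun x _ => Bool.and_comm _ _)

theorem self_filtform {L E : List (Int × Int)} (h : ∃ p, E = L.filter p) :
    E = L.filter (fun x => decide (x ∈ E)) := by
  obtain ⟨p, hp⟩ := h
  rw [hp]
  exact List.filter_congr (fun x hx => by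
    by_cases hpx : p x = true <;> simp [List.mem_filter, hx, hpx])

theorem filtform_unique {L E1 E2 : List (Int × Int)}
    (h1 : E1 = L.filter (fun x => decide (x ∈ E1)))
    (h2 : E2 = L.filter (fun x => decide (x ∈ E2)))
    (hm : ∀ v, v ∈ E1 ↔ v ∈ E2) : E1 = E2 := by
  rw [h1, h2]
  apply List.filter_congr
  intro x _
  simp [hm x]

theorem mem_iff_of_counts_eq {E1 E2 : List (Int × Int)}
    (h : ∀ v, E1.count v = E2.count v) (v : Int × Int) : v ∈ E1 ↔ v ∈ E2 := by
  rw [← List.count_pos_iff, ← List.count_pos_iff, h v]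

-- ---- indexing helpers ----
theorem getD_setD (xs : List Int) (i k v : Int) (hi0 : 0 ≤ i) (hi : i < (xs.length : Int))
    (hk0 : 0 ≤ k) (hk : k < (xs.length : Int)) :
    PySem.List.pyGetD (PySem.List.pySetD xs i v) k 0 = if k = i then v else PySem.List.pyGetD xs k 0 := by
  rw [PySem.List.pySetD_of_nonneg xs v hi0]
  rw [PySem.List.pyGetD_eq_getElem _ _ hk0 (by simpa using hk)]
  rw [PySem.List.pyGetD_eq_getElem _ _ hk0 hk]
  rw [List.getElem_set]
  by_cases h : k = i
  · simp [h]
  · have : i.toNat ≠ k.toNat := by omega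
    simp [h, this]

-- ---- the invariant carried through A's loop ----
structure LfInv (rows cols : Int) (L E : List (Int × Int)) (pr pc : List Int) : Prop where
  bnds : ∀ e ∈ E, 0 ≤ e.1 ∧ e.1 < rows ∧ 0 ≤ e.2 ∧ e.2 < cols
  lenR : pr.length = rows.toNat
  lenC : pc.length = cols.toNat
  syncR : ∀ k : Int, 0 ≤ k → k < rows → PySem.List.pyGetD pr k 0 = (degR E k : Int)
  syncC : ∀ k : Int, 0 ≤ k → k < cols → PySem.List.pyGetD pc k 0 = (degC E k : Int)
  filt : E = L.filter (fun x => decide (x ∈ E))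
  core : ∀ v, (lfCore E).count v = (lfCore L).count v

-- erased edge lists stay in filter-form
theorem erase_eq_filter : ∀ (E : List (Int × Int)) (e : Int × Int), E.count e ≤ 1 →
    E.erase e = E.filter (fun x => !(x == e))
  | [], e, _ => by simp
  | x :: E, e, h => by
      by_cases hx : x = e
      · subst hx
        have h0 : E.count x = 0 := by
          rw [List.count_cons_self] at h; omega
        have hne : x ∉ E := by
          intro hm; have := List.count_pos_iff.mpr hm; omega
        rw [List.erase_cons_head, List.filter_cons_of_neg (by simp)]
        symm
        exact List.filter_eq_self.mpr (fun a ha => by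
          have : a ≠ x := fun hh => hne (hh ▸ ha)
          simp [this])
      · rw [List.erase_cons_tail (by simpa using hx)]
        have h' : E.count e ≤ 1 := by
          rw [List.count_cons_of_ne hx] at h; exact h
        rw [erase_eq_filter E e h']
        simp [hx]

theorem filtform_erase {L E : List (Int × Int)} {e : Int × Int}
    (hf : E = L.filter (fun x => decide (x ∈ E))) (hc : E.count e ≤ 1) :
    E.erase e = L.filter (fun x => decide (x ∈ E.erase e)) := by
  apply self_filtform
  refine ⟨fun x => decide (x ∈ E) && !(x == e), ?_⟩
  rw [erase_eq_filter E e hc]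
  conv_lhs => rw [hf]
  rw [List.filter_filter]
  exact List.filter_congr (fun x _ => Bool.and_comm _ _)

-- degree change under erase
theorem degR_erase {E : List (Int × Int)} {e : Int × Int} (he : e ∈ E) (k : Int) :
    degR E k = (if e.1 == k then 1 else 0) + degR (E.erase e) k := by
  unfold degR
  rw [(List.perm_cons_erase he).countP_eq]
  rw [List.countP_cons]
  omega

theorem degC_erase {E : List (Int × Int)} {e : Int × Int} (he : e ∈ E) (k : Int) :
    degC E k = (if e.2 == k then 1 else 0) + degC (E.erase e) k := by
  unfold degC
  rw [(List.perm_cons_erase he).countP_eq]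
  rw [List.countP_cons]
  omega

-- ---- one row step of A ----
theorem rowStep_spec {rows cols : Int} {L E : List (Int × Int)} {pr pc : List Int}
    (inv : LfInv rows cols L E pr pc) (k : Int) (hk0 : 0 ≤ k) (hk : k < rows) (b : Bool) :
    (lftRowStep (E, pr, pc, b) k = (E, pr, pc, b) ∧ degR E k ≠ 1) ∨
    (∃ E' pr' pc', lftRowStep (E, pr, pc, b) k = (E', pr', pc', false) ∧
      LfInv rows cols L E' pr' pc' ∧ E'.length + 1 = E.length) := by
  by_cases hd : PySem.List.pyGetD pr k 0 = 1
  · right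
    have hdeg : degR E k = 1 := by
      have hs := inv.syncR k hk0 hk
      rw [hd] at hs; exact_mod_cast hs.symm
    have hpos : 0 < E.countP (fun e => e.1 == k) := by
      have : 0 < degR E k := by omega
      exact this
    obtain ⟨w, hwE, hwk⟩ := List.countP_pos_iff.mp hpos
    rcases hfind : E.find? (fun e => e.1 == k) with _ | e
    · exact absurd ((List.find?_eq_none.mp hfind) w hwE) (by simp_all)
    have he : e ∈ E := List.mem_of_find?_eq_some hfind
    have hek : e.1 = k := by simpa using List.find?_some hfind
    have heb := inv.bnds e he
    have hcnt : E.count e ≤ 1 := by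
      have := count_le_degR E e
      rw [hek] at this; omega
    have hrows0 : 0 ≤ rows := le_trans heb.1 (le_of_lt heb.2.1)
    have hcols0 : 0 ≤ cols := le_trans heb.2.2.1 (le_of_lt heb.2.2.2)
    have hprlen : (pr.length : Int) = rows := by rw [inv.lenR]; omega
    have hpclen : (pc.length : Int) = cols := by rw [inv.lenC]; omega
    refine ⟨E.erase e, PySem.List.pySetD pr e.1 0, lftIncr pc e.2 (-1), ?_, ?_, ?_⟩
    · simp only [lftRowStep, if_pos hd, hfind]
      rw [PySem.List.remove?_eq_some_erase E e he]
      rfl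
    · refine ⟨?_, ?_, ?_, ?_, ?_, ?_, ?_⟩
      · exact fun x hx => inv.bnds x (List.mem_of_mem_erase hx)
      · rw [PySem.List.length_pySetD]; exact inv.lenR
      · rw [lftIncr, PySem.List.length_pySetD]; exact inv.lenC
      · intro k' h0 h1
        rw [getD_setD pr e.1 k' 0 heb.1 (by omega) h0 (by omega)]
        have hde := degR_erase he k'
        by_cases hkk : k' = e.1
        · rw [if_pos hkk]
          subst hkk
          rw [hek] at hde ⊢
          simp at hde
          omega
        · rw [if_neg hkk]
          rw [inv.syncR k' h0 h1]
          have : (e.1 == k') = false := by simpa using fun hh => hkk hh.symm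
          rw [this] at hde
          simp at hde
          omega
      · intro k' h0 h1
        rw [lftIncr, getD_setD pc e.2 k' _ heb.2.2.1 (by omega) h0 (by omega)]
        have hde := degC_erase he k'
        by_cases hkk : k' = e.2
        · rw [if_pos hkk]
          subst hkk
          simp at hde
          rw [inv.syncC e.2 heb.2.2.1 heb.2.2.2]
          omega
        · rw [if_neg hkk]
          rw [inv.syncC k' h0 h1]
          have : (e.2 == k') = false := by simpa using fun hh => hkk hh.symm
          rw [this] at hde
          simp at hde
          omega
      · exact filtform_erase inv.filt hcnt
      · intro v
        rw [lfCore_erase he (leaf_not_in_core_row (hek ▸ hdeg))]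
        exact inv.core v
    · have := List.length_erase_of_mem he
      have hpos2 : 0 < E.length := List.length_pos_of_mem he
      omega
  · left
    refine ⟨by simp [lftRowStep, hd], ?_⟩
    intro h1
    apply hd
    rw [inv.syncR k hk0 hk, h1]
    rfl

theorem colStep_spec {rows cols : Int} {L E : List (Int × Int)} {pr pc : List Int}
    (inv : LfInv rows cols L E pr pc) (k : Int) (hk0 : 0 ≤ k) (hk : k < cols) (b : Bool) :
    (lftColStep (E, pr, pc, b) k = (E, pr, pc, b) ∧ degC E k ≠ 1) ∨
    (∃ E' pr' pc', lftColStep (E, pr, pc, b) k = (E', pr', pc', false) ∧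
      LfInv rows cols L E' pr' pc' ∧ E'.length + 1 = E.length) := by
  by_cases hd : PySem.List.pyGetD pc k 0 = 1
  · right
    have hdeg : degC E k = 1 := by
      have hs := inv.syncC k hk0 hk
      rw [hd] at hs; exact_mod_cast hs.symm
    have hpos : 0 < E.countP (fun e => e.2 == k) := by
      have : 0 < degC E k := by omega
      exact this
    obtain ⟨w, hwE, hwk⟩ := List.countP_pos_iff.mp hpos
    rcases hfind : E.find? (fun e => e.2 == k) with _ | e
    · exact absurd ((List.find?_eq_none.mp hfind) w hwE) (by simp_all)
    have he : e ∈ E := List.mem_of_find?_eq_some hfind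
    have hek : e.2 = k := by simpa using List.find?_some hfind
    have heb := inv.bnds e he
    have hcnt : E.count e ≤ 1 := by
      have h1 := count_le_degC E e
      rw [hek] at h1; omega
    have hrows0 : 0 ≤ rows := le_trans heb.1 (le_of_lt heb.2.1)
    have hcols0 : 0 ≤ cols := le_trans heb.2.2.1 (le_of_lt heb.2.2.2)
    have hprlen : (pr.length : Int) = rows := by rw [inv.lenR]; omega
    have hpclen : (pc.length : Int) = cols := by rw [inv.lenC]; omega
    refine ⟨E.erase e, lftIncr pr e.1 (-1), PySem.List.pySetD pc e.2 0, ?_, ?_, ?_⟩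
    · simp only [lftColStep, if_pos hd, hfind]
      rw [PySem.List.remove?_eq_some_erase E e he]
      rfl
    · refine ⟨?_, ?_, ?_, ?_, ?_, ?_, ?_⟩
      · exact fun x hx => inv.bnds x (List.mem_of_mem_erase hx)
      · rw [lftIncr, PySem.List.length_pySetD]; exact inv.lenR
      · rw [PySem.List.length_pySetD]; exact inv.lenC
      · intro k' h0 h1
        rw [lftIncr, getD_setD pr e.1 k' _ heb.1 (by omega) h0 (by omega)]
        have hde := degR_erase he k'
        by_cases hkk : k' = e.1
        · rw [if_pos hkk]
          subst hkk
          simp at hde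
          rw [inv.syncR e.1 heb.1 heb.2.1]
          omega
        · rw [if_neg hkk]
          rw [inv.syncR k' h0 h1]
          have : (e.1 == k') = false := by simpa using fun hh => hkk hh.symm
          rw [this] at hde
          simp at hde
          omega
      · intro k' h0 h1
        rw [getD_setD pc e.2 k' 0 heb.2.2.1 (by omega) h0 (by omega)]
        have hde := degC_erase he k'
        by_cases hkk : k' = e.2
        · rw [if_pos hkk]
          subst hkk
          rw [hek] at hde ⊢
          simp at hde
          omega
        · rw [if_neg hkk]
          rw [inv.syncC k' h0 h1]
          have : (e.2 == k') = false := by simpa using fun hh => hkk hh.symm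
          rw [this] at hde
          simp at hde
          omega
      · exact filtform_erase inv.filt hcnt
      · intro v
        rw [lfCore_erase he (leaf_not_in_core_col (hek ▸ hdeg))]
        exact inv.core v
    · have := List.length_erase_of_mem he
      have hpos2 : 0 < E.length := List.length_pos_of_mem he
      omega
  · left
    refine ⟨by simp [lftColStep, hd], ?_⟩
    intro h1
    apply hd
    rw [inv.syncC k hk0 hk, h1]
    rfl

theorem rowSweep_spec {rows cols : Int} {L : List (Int × Int)} :
    ∀ (ks : List Int) (E : List (Int × Int)) (pr pc : List Int) (b : Bool),
    (∀ k ∈ ks, 0 ≤ k ∧ k < rows) → LfInv rows cols L E pr pc →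
    LfInv rows cols L (ks.foldl lftRowStep (E, pr, pc, b)).1
      (ks.foldl lftRowStep (E, pr, pc, b)).2.1 (ks.foldl lftRowStep (E, pr, pc, b)).2.2.1 ∧
    (ks.foldl lftRowStep (E, pr, pc, b)).1.length ≤ E.length ∧
    ((ks.foldl lftRowStep (E, pr, pc, b)).2.2.2 = true →
      ks.foldl lftRowStep (E, pr, pc, b) = (E, pr, pc, b) ∧ b = true ∧ ∀ k ∈ ks, degR E k ≠ 1) ∧
    ((ks.foldl lftRowStep (E, pr, pc, b)).2.2.2 = false →
      b = false ∨ (ks.foldl lftRowStep (E, pr, pc, b)).1.length < E.length)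
  | [], E, pr, pc, b, _, inv => by
      refine ⟨inv, le_rfl, ?_, ?_⟩
      · intro hb; exact ⟨rfl, hb, fun k hk => absurd hk (List.not_mem_nil)⟩
      · intro hb; exact Or.inl hb
  | k :: ks, E, pr, pc, b, hks, inv => by
      have hk := hks k List.mem_cons_self
      rcases rowStep_spec inv k hk.1 hk.2 b with ⟨heq, hdeg⟩ | ⟨E', pr', pc', heq, inv', hlen⟩
      · rw [List.foldl_cons, heq]
        obtain ⟨i1, i2, i3, i4⟩ := rowSweep_spec ks E pr pc b (fun x hx => hks x (List.mem_cons_of_mem _ hx)) inv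
        refine ⟨i1, i2, ?_, i4⟩
        intro hb
        obtain ⟨j1, j2, j3⟩ := i3 hb
        exact ⟨j1, j2, fun x hx => by
          rcases List.mem_cons.mp hx with h | h
          · subst h; exact hdeg
          · exact j3 x h⟩
      · rw [List.foldl_cons, heq]
        obtain ⟨i1, i2, i3, i4⟩ := rowSweep_spec ks E' pr' pc' false (fun x hx => hks x (List.mem_cons_of_mem _ hx)) inv'
        refine ⟨i1, by omega, ?_, ?_⟩
        · intro hb
          obtain ⟨_, j2, _⟩ := i3 hb
          exact absurd j2 (by simp)
        · intro _
          right
          omega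

theorem colSweep_spec {rows cols : Int} {L : List (Int × Int)} :
    ∀ (ks : List Int) (E : List (Int × Int)) (pr pc : List Int) (b : Bool),
    (∀ k ∈ ks, 0 ≤ k ∧ k < cols) → LfInv rows cols L E pr pc →
    LfInv rows cols L (ks.foldl lftColStep (E, pr, pc, b)).1
      (ks.foldl lftColStep (E, pr, pc, b)).2.1 (ks.foldl lftColStep (E, pr, pc, b)).2.2.1 ∧
    (ks.foldl lftColStep (E, pr, pc, b)).1.length ≤ E.length ∧
    ((ks.foldl lftColStep (E, pr, pc, b)).2.2.2 = true →
      ks.foldl lftColStep (E, pr, pc, b) = (E, pr, pc, b) ∧ b = true ∧ ∀ k ∈ ks, degC E k ≠ 1) ∧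
    ((ks.foldl lftColStep (E, pr, pc, b)).2.2.2 = false →
      b = false ∨ (ks.foldl lftColStep (E, pr, pc, b)).1.length < E.length)
  | [], E, pr, pc, b, _, inv => by
      refine ⟨inv, le_rfl, ?_, ?_⟩
      · intro hb; exact ⟨rfl, hb, fun k hk => absurd hk (List.not_mem_nil)⟩
      · intro hb; exact Or.inl hb
  | k :: ks, E, pr, pc, b, hks, inv => by
      have hk := hks k List.mem_cons_self
      rcases colStep_spec inv k hk.1 hk.2 b with ⟨heq, hdeg⟩ | ⟨E', pr', pc', heq, inv', hlen⟩
      · rw [List.foldl_cons, heq]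
        obtain ⟨i1, i2, i3, i4⟩ := colSweep_spec ks E pr pc b (fun x hx => hks x (List.mem_cons_of_mem _ hx)) inv
        refine ⟨i1, i2, ?_, i4⟩
        intro hb
        obtain ⟨j1, j2, j3⟩ := i3 hb
        exact ⟨j1, j2, fun x hx => by
          rcases List.mem_cons.mp hx with h | h
          · subst h; exact hdeg
          · exact j3 x h⟩
      · rw [List.foldl_cons, heq]
        obtain ⟨i1, i2, i3, i4⟩ := colSweep_spec ks E' pr' pc' false (fun x hx => hks x (List.mem_cons_of_mem _ hx)) inv'
        refine ⟨i1, by omega, ?_, ?_⟩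
        · intro hb
          obtain ⟨_, j2, _⟩ := i3 hb
          exact absurd j2 (by simp)
        · intro _
          right
          omega

-- ---- the outer loop reaches B's answer ----
theorem loop_spec {rows cols : Int} {L : List (Int × Int)} :
    ∀ (fuel : Nat) (E : List (Int × Int)) (pr pc : List Int),
    LfInv rows cols L E pr pc → E.length < fuel → (E = L ∨ 4 ≤ E.length) →
    lftLoop rows cols fuel E pr pc =
      (if (lfCore L).length = L.length ∨ 4 ≤ (lfCore L).length then some (lfCore L) else none)
  | 0, E, pr, pc, _, hfuel, _ => absurd hfuel (by omega)
  | fuel+1, E, pr, pc, inv, hfuel, hE4 => by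
      have hksR : ∀ k ∈ PySem.List.pyRange 0 rows 1, 0 ≤ k ∧ k < rows := fun k hk => by
        have := PySem.List.mem_pyRange_one.mp hk; exact this
      have hksC : ∀ k ∈ PySem.List.pyRange 0 cols 1, 0 ≤ k ∧ k < cols := fun k hk => by
        have := PySem.List.mem_pyRange_one.mp hk; exact this
      have row := rowSweep_spec (rows := rows) (cols := cols) (L := L)
        (PySem.List.pyRange 0 rows 1) E pr pc true hksR inv
      rcases hs1 : (PySem.List.pyRange 0 rows 1).foldl lftRowStep (E, pr, pc, true) with ⟨E1, pr1, pc1, b1⟩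
      rw [hs1] at row
      dsimp only at row
      have col := colSweep_spec (rows := rows) (cols := cols) (L := L)
        (PySem.List.pyRange 0 cols 1) E1 pr1 pc1 b1 hksC row.1
      rcases hs2 : (PySem.List.pyRange 0 cols 1).foldl lftColStep (E1, pr1, pc1, b1) with ⟨E2, pr2, pc2, b2⟩
      rw [hs2] at col
      dsimp only at col
      rw [lftLoop, hs1, hs2]
      dsimp only
      cases hb2 : b2 with
      | true =>
          rw [if_pos rfl]
          obtain ⟨hcEq, hb1, hcolDeg⟩ := col.2.2.1 hb2
          rw [Prod.mk.injEq, Prod.mk.injEq, Prod.mk.injEq] at hcEq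
          obtain ⟨hE2, hpr2, hpc2, -⟩ := hcEq
          subst hb1
          obtain ⟨hrEq, -, hrowDeg⟩ := row.2.2.1 rfl
          rw [Prod.mk.injEq, Prod.mk.injEq, Prod.mk.injEq] at hrEq
          obtain ⟨hE1, hpr1, hpc1, -⟩ := hrEq
          subst hE2; subst hE1
          -- the pass removed nothing: the state is stable, hence it is exactly the core of L
          have hstab : lfStable E2 := by
            intro e he
            have hbnd := inv.bnds e he
            have hR : degR E2 e.1 ≠ 1 :=
              hrowDeg e.1 (PySem.List.mem_pyRange_one.mpr ⟨hbnd.1, hbnd.2.1⟩)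
            have hC : degC E2 e.2 ≠ 1 :=
              hcolDeg e.2 (PySem.List.mem_pyRange_one.mpr ⟨hbnd.2.2.1, hbnd.2.2.2⟩)
            have h1 := degR_pos_of_mem he
            have h2 := degC_pos_of_mem he
            unfold lfGood
            simp only [Bool.and_eq_true, decide_eq_true_eq]
            omega
          have hcnt : ∀ v, E2.count v = (lfCore L).count v := fun v => by
            have h1 := inv.core v
            rw [lfCore, coreN_of_stable hstab E2.length] at h1
            exact h1
          have hEeq : E2 = lfCore L :=
            filtform_unique inv.filt
              (self_filtform (exists_filter_coreN L.length L))
              (mem_iff_of_counts_eq hcnt)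
          have hlenEq : E2.length = (lfCore L).length := length_eq_of_counts_eq hcnt
          have hcond : (lfCore L).length = L.length ∨ 4 ≤ (lfCore L).length := by
            rcases hE4 with h | h
            · left; rw [← hlenEq, h]
            · right; omega
          rw [if_pos hcond, hEeq]
      | false =>
          rw [if_neg (by simp)]
          have hlt : E2.length < E.length := by
            rcases col.2.2.2 hb2 with hb1 | hl2
            · subst hb1
              rcases row.2.2.2 rfl with hcontra | hl1
              · exact absurd hcontra (by simp)
              · have := col.2.1; omega
            · have := row.2.1; omega
          have hcoreLen : (lfCore L).length ≤ E2.length := by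
            apply length_le_of_counts_le
            intro v
            rw [← (col.1).core v]
            exact lfCore_counts_le E2 v
          have hEL : E.length ≤ L.length := by
            have h1 := List.length_filter_le (fun x => decide (x ∈ E)) L
            rw [← inv.filt] at h1
            exact h1
          by_cases h4 : E2.length < 4
          · rw [if_pos h4]
            rw [if_neg (by rintro (h | h) <;> omega)]
          · rw [if_neg h4]
            exact loop_spec fuel E2 pr2 pc2 col.1 (by omega) (Or.inr (by omega))

-- ---- initial degree arrays ----
theorem build_spec {rows cols : Int} :
    ∀ (E : List (Int × Int)) (pr pc : List Int),
    pr.length = rows.toNat → pc.length = cols.toNat →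
    (∀ e ∈ E, 0 ≤ e.1 ∧ e.1 < rows ∧ 0 ≤ e.2 ∧ e.2 < cols) →
    ((E.foldl (fun s e => (lftIncr s.1 e.1 1, lftIncr s.2 e.2 1)) (pr, pc)).1.length = rows.toNat ∧
     (E.foldl (fun s e => (lftIncr s.1 e.1 1, lftIncr s.2 e.2 1)) (pr, pc)).2.length = cols.toNat) ∧
    (∀ k : Int, 0 ≤ k → k < rows →
      PySem.List.pyGetD (E.foldl (fun s e => (lftIncr s.1 e.1 1, lftIncr s.2 e.2 1)) (pr, pc)).1 k 0
        = PySem.List.pyGetD pr k 0 + (degR E k : Int)) ∧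
    (∀ k : Int, 0 ≤ k → k < cols →
      PySem.List.pyGetD (E.foldl (fun s e => (lftIncr s.1 e.1 1, lftIncr s.2 e.2 1)) (pr, pc)).2 k 0
        = PySem.List.pyGetD pc k 0 + (degC E k : Int))
  | [], pr, pc, h1, h2, _ => by
      refine ⟨⟨h1, h2⟩, ?_, ?_⟩ <;> intro k hk0 hk <;> simp [degR, degC]
  | e :: E, pr, pc, h1, h2, hb => by
      have heb := hb e List.mem_cons_self
      have hrows0 : 0 ≤ rows := le_trans heb.1 (le_of_lt heb.2.1)
      have hcols0 : 0 ≤ cols := le_trans heb.2.2.1 (le_of_lt heb.2.2.2)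
      have hprlen : (pr.length : Int) = rows := by rw [h1]; omega
      have hpclen : (pc.length : Int) = cols := by rw [h2]; omega
      have h1' : (lftIncr pr e.1 1).length = rows.toNat := by
        rw [lftIncr, PySem.List.length_pySetD]; exact h1
      have h2' : (lftIncr pc e.2 1).length = cols.toNat := by
        rw [lftIncr, PySem.List.length_pySetD]; exact h2
      obtain ⟨ih1, ih2, ih3⟩ := build_spec E (lftIncr pr e.1 1) (lftIncr pc e.2 1) h1' h2'
        (fun x hx => hb x (List.mem_cons_of_mem _ hx))
      rw [List.foldl_cons]
      refine ⟨ih1, ?_, ?_⟩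
      · intro k hk0 hk
        rw [ih2 k hk0 hk]
        rw [lftIncr, getD_setD pr e.1 k _ heb.1 (by omega) hk0 (by omega)]
        have hdc : degR (e :: E) k = degR E k + (if (e.1 == k) = true then 1 else 0) := by
          unfold degR; rw [List.countP_cons]
        by_cases hke : k = e.1
        · rw [if_pos hke]
          subst hke
          simp only [BEq.rfl] at hdc
          rw [hdc]
          push_cast
          omega
        · rw [if_neg hke]
          have : (e.1 == k) = false := by simpa using fun hh => hke hh.symm
          rw [this] at hdc
          rw [hdc]
          push_cast
          omega
      · intro k hk0 hk
        rw [ih3 k hk0 hk]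
        rw [lftIncr, getD_setD pc e.2 k _ heb.2.2.1 (by omega) hk0 (by omega)]
        have hdc : degC (e :: E) k = degC E k + (if (e.2 == k) = true then 1 else 0) := by
          unfold degC; rw [List.countP_cons]
        by_cases hke : k = e.2
        · rw [if_pos hke]
          subst hke
          simp only [BEq.rfl] at hdc
          rw [hdc]
          push_cast
          omega
        · rw [if_neg hke]
          have : (e.2 == k) = false := by simpa using fun hh => hke hh.symm
          rw [this] at hdc
          rw [hdc]
          push_cast
          omega

-- ---- bridge: B's degree tables are the degree functions, B's loop is coreN ----
theorem getD_replicate (n : Nat) (k : Int) (h0 : 0 ≤ k) (h1 : k < (n : Int)) :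
    PySem.List.pyGetD (List.replicate n (0 : Int)) k 0 = 0 := by
  rw [PySem.List.pyGetD_eq_getElem _ _ h0 (by simpa using h1)]
  exact List.getElem_replicate _

theorem prune_eq_coreN {rows cols : Int} : ∀ (f : Nat) (E : List (Int × Int)),
    (∀ e ∈ E, 0 ≤ e.1 ∧ e.1 < rows ∧ 0 ≤ e.2 ∧ e.2 < cols) →
    lftPrune f rows cols E = coreN f E
  | 0, _, _ => rfl
  | f+1, E, hb => by
      obtain ⟨-, hs1, hs2⟩ := @build_spec rows cols E (List.replicate rows.toNat 0)
        (List.replicate cols.toNat 0) (by simp) (by simp) hb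
      have hkept : E.filter (fun e =>
          2 ≤ PySem.List.pyGetD (E.foldl (fun s e => (lftIncr s.1 e.1 1, lftIncr s.2 e.2 1))
                (List.replicate rows.toNat 0, List.replicate cols.toNat 0)).1 e.1 0 &&
          2 ≤ PySem.List.pyGetD (E.foldl (fun s e => (lftIncr s.1 e.1 1, lftIncr s.2 e.2 1))
                (List.replicate rows.toNat 0, List.replicate cols.toNat 0)).2 e.2 0) = lfF E := by
        rw [lfF]
        apply List.filter_congr
        intro x hx
        have hbx := hb x hx
        rw [hs1 x.1 hbx.1 hbx.2.1, hs2 x.2 hbx.2.2.1 hbx.2.2.2]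
        rw [getD_replicate rows.toNat x.1 hbx.1 (by omega)]
        rw [getD_replicate cols.toNat x.2 hbx.2.2.1 (by omega)]
        unfold lfGood
        have e1 : (2 ≤ (0 : Int) + (degR E x.1 : Int)) ↔ 2 ≤ degR E x.1 := by omega
        have e2 : (2 ≤ (0 : Int) + (degC E x.2 : Int)) ↔ 2 ≤ degC E x.2 := by omega
        rw [decide_eq_decide.mpr e1, decide_eq_decide.mpr e2]
      rw [lftPrune, coreN]
      rw [hkept]
      by_cases hl : (lfF E).length = E.length
      · rw [if_pos hl, if_pos hl]
      · rw [if_neg hl, if_neg hl]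
        exact prune_eq_coreN f (lfF E) (fun x hx => hb x (List.mem_of_mem_filter hx))

-- ===== VERDICT (by name: the statement is the Claim_ definition above) =====
theorem look_for_trend_spec : Claim_equal_look_for_trend := by
  intro rows cols L _ hPre
  unfold Spec_look_for_trend look_for_trend look_for_trend_alt
  rw [prune_eq_coreN (rows := rows) (cols := cols) L.length L hPre]
  have hb := @build_spec rows cols L (List.replicate rows.toNat 0) (List.replicate cols.toNat 0)
    (by simp) (by simp) hPre
  obtain ⟨⟨hl1, hl2⟩, hs1, hs2⟩ := hb
  have hrep := getD_replicate
  have inv : LfInv rows cols L L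
      (L.foldl (fun s e => (lftIncr s.1 e.1 1, lftIncr s.2 e.2 1)) (List.replicate rows.toNat 0, List.replicate cols.toNat 0)).1
      (L.foldl (fun s e => (lftIncr s.1 e.1 1, lftIncr s.2 e.2 1)) (List.replicate rows.toNat 0, List.replicate cols.toNat 0)).2 := by
    refine ⟨hPre, hl1, hl2, ?_, ?_, ?_, fun v => rfl⟩
    · intro k h0 h1
      rw [hs1 k h0 h1, hrep rows.toNat k h0 (by omega)]
      omega
    · intro k h0 h1
      rw [hs2 k h0 h1, hrep cols.toNat k h0 (by omega)]
      omega
    · symm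
      exact List.filter_eq_self.mpr (fun a ha => by simp [ha])
  have := loop_spec (L.length + 1) L _ _ inv (by omega) (Or.inl rfl)
  rw [this]
  rfl
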